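-- pv_equiv track=rewrite | github.com/Michaelanand123singh/excel-ai-agent-backends | app/services/data_processor/schema_def.py | derive_part_number
-- ===== SOURCE A (Python) =====
-- from typing import Dict, List, Any, Tuple
--
-- def derive_part_number(item_description: Any) -> str | None:
--     if not isinstance(item_description, str):
--         return None
--     # Heuristic: take the longest token with letters+digits and at least 3 chars
--     tokens = [t.strip(" ,;:\t\n\r()[]{}") for t in item_description.split()]
--     candidates = [t for t in tokens if any(c.isalpha() for c in t) and any(c.isdigit() for c in t) and len(t) >= 3]
--     if not candidates:
--         # fallback: first token >= 3
--         candidates = [t for t in tokens if len(t) >= 3]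
--     return candidates[0] if candidates else None
-- ===== SOURCE B (Python) =====
-- def derive_part_number(item_description):
--     if not isinstance(item_description, str):
--         return None
--     # Rank-and-select: give every stripped token an integer key rank*n + position
--     # (rank 0 = has letter+digit and len>=3, rank 1 = len>=3, rank 2 = too short),
--     # then one min() call picks the winner; keys >= 2*n mean "no usable token".
--     toks = [t.strip(" ,;:\t\n\r()[]{}") for t in item_description.split()]
--     n = len(toks)
--     if n == 0:
--         return None
--
--     def rank(t):
--         if len(t) < 3:
--             return 2
--         if any(c.isalpha() for c in t) and any(c.isdigit() for c in t):
--             return 0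
--         return 1
--
--     best = min((rank(t) * n + i, t) for i, t in enumerate(toks))
--     return best[1] if best[0] < 2 * n else None
-- ===== Notes on version B (the rewrite author's own statement) =====
-- stated objective: alternative
-- what changed: Replaces A's staged filtering (filter primary candidates, conditionally refilter for fallbacks, take the head) by a rank-and-select scheme: every stripped token gets one integer key rank*n+position (rank 0 primary, 1 fallback, 2 unusable) and a single min() over the keyed list picks the winner, with keys >= 2n meaning no usable token.
import Mathlib
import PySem

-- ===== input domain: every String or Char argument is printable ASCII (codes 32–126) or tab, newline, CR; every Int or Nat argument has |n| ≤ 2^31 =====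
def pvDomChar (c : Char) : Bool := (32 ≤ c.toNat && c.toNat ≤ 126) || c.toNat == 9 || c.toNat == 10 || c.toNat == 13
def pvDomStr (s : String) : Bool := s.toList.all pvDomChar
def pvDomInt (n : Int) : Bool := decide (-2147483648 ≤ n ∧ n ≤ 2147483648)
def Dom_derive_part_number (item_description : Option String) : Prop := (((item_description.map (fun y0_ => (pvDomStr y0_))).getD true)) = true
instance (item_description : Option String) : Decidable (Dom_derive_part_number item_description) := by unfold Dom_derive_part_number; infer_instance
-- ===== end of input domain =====

-- B replaces A's staged filtering by ranking each token with one integer key rank*n+position and a single min(); same return value.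
-- ===== PORT A =====
def pvStrip (t : String) : String := PySem.Str.stripChars t " ,;:\t\n\r()[]{}"

def pvIsPrimaryA (t : String) : Bool :=
  t.toList.any PySem.Chars.isalpha && t.toList.any PySem.Chars.isdigit && decide (3 ≤ PySem.Str.len t)

def derive_part_number (item_description : Option String) : Option String :=
  match item_description with
  | none => none
  | some s =>
    let tokens := (PySem.Str.split₀ s).map pvStrip
    let candidates := tokens.filter pvIsPrimaryA
    let candidates := if candidates.isEmpty then tokens.filter (fun t => decide (3 ≤ PySem.Str.len t)) else candidates
    candidates.head?

-- ===== PORT B =====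
def pvRank (t : String) : Int :=
  if PySem.Str.len t < 3 then 2
  else if t.toList.any PySem.Chars.isalpha && t.toList.any PySem.Chars.isdigit then 0
  else 1

-- Python's min compares the (key, token) pairs lexicographically; the integer keys are pairwise
-- distinct (rank*n+i with distinct i < n), so min by the integer key alone is the same element.
def derive_part_number_alt (item_description : Option String) : Option String :=
  match item_description with
  | none => none
  | some s =>
    let toks := (PySem.Str.split₀ s).map pvStrip
    let n : Int := toks.length
    if toks.length = 0 then none
    else
      match PySem.List.min? ((PySem.List.enumerate toks 0).map (fun p => (pvRank p.2 * n + p.1, p.2))) (fun p => p.1) with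
      | some best => if best.1 < 2 * n then some best.2 else none
      | none => none

-- ===== PRECONDITION & SPEC =====
def Spec_derive_part_number (item_description : Option String) (out : Option String) : Prop := out = derive_part_number_alt item_description
instance (item_description : Option String) (out : Option String) : Decidable (Spec_derive_part_number item_description out) := by unfold Spec_derive_part_number; infer_instance

-- ===== CLAIM (what is proved, stated in full; the proofs are below) =====
def Claim_equal_derive_part_number : Prop := ∀ (item_description : Option String), Dom_derive_part_number item_description → Spec_derive_part_number item_description (derive_part_number item_description)

-- ===== LEMMAS AND PROOFS =====
def pvMinStep (acc : Option (Int × String)) (x : Int × String) : Option (Int × String) :=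
  match acc with
  | none => some x
  | some m => if x.1 < m.1 then some x else some m

lemma pv_min?_eq_foldl (l : List (Int × String)) :
    PySem.List.min? l (fun p => p.1) = l.foldl pvMinStep none := by
  unfold PySem.List.min? pvMinStep
  congr 1
  funext acc x
  cases acc <;> rfl

def pvRmin (ts : List String) : Int := ts.foldr (fun t m => min (pvRank t) m) 2

lemma pv_rmin_le_two (ts : List String) : pvRmin ts ≤ 2 := by
  induction ts with
  | nil => simp [pvRmin]
  | cons x xs ih => simp only [pvRmin, List.foldr_cons] at *; omega


lemma pv_rank_cases (t : String) : pvRank t = 0 ∨ pvRank t = 1 ∨ pvRank t = 2 := by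
  unfold pvRank; split_ifs <;> simp

lemma pv_rmin_le (ts : List String) (u : String) (hu : u ∈ ts) : pvRmin ts ≤ pvRank u := by
  induction ts with
  | nil => cases hu
  | cons x xs ih =>
    rcases List.mem_cons.mp hu with h | h
    · subst h; simp [pvRmin]
    · have := ih h
      simp only [pvRmin, List.foldr_cons] at *
      omega

lemma pv_foldl_some (l : List (Int × String)) (a : Int × String) :
    l.foldl pvMinStep (some a) =
      some (match l.foldl pvMinStep none with
            | none => a
            | some b => if b.1 < a.1 then b else a) := by
  induction l generalizing a with
  | nil => rfl
  | cons x xs ih =>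
    simp only [List.foldl_cons]
    rw [show pvMinStep none x = some x from rfl, ih x]
    cases hb : xs.foldl pvMinStep none with
    | none =>
      by_cases h : x.1 < a.1
      · rw [show pvMinStep (some a) x = some x from by simp [pvMinStep, h], ih x, hb]
        simp [h]
      · rw [show pvMinStep (some a) x = some a from by simp [pvMinStep, h], ih a, hb]
        simp [h]
    | some b =>
      by_cases h : x.1 < a.1
      · rw [show pvMinStep (some a) x = some x from by simp [pvMinStep, h], ih x, hb]
        by_cases hb1 : b.1 < x.1 <;> simp only [hb1, if_pos, if_neg, not_false_iff] <;>
          split_ifs <;> simp_all <;> omega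
      · rw [show pvMinStep (some a) x = some a from by simp [pvMinStep, h], ih a, hb]
        by_cases hb1 : b.1 < x.1 <;> simp only [hb1, if_pos, if_neg, not_false_iff] <;>
          split_ifs <;> simp_all <;> omega

lemma pv_min_char (ts : List String) (n : Int) :
    ∀ (i : Int), 0 ≤ i → i + ts.length ≤ n → ts ≠ [] →
      ∃ (j : Int) (t : String),
        i ≤ j ∧ j < i + ts.length ∧
        ((PySem.List.enumerate ts i).map (fun p => (pvRank p.2 * n + p.1, p.2))).foldl pvMinStep none
          = some (pvRank t * n + j, t) ∧
        pvRank t = pvRmin ts ∧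
        (ts.filter (fun u => pvRank u == pvRmin ts)).head? = some t := by
  induction ts with
  | nil => intro i _ _ h; exact absurd rfl h
  | cons x xs ih =>
    intro i hi hn _
    rw [PySem.List.enumerate_cons]
    simp only [List.map_cons, List.foldl_cons]
    rw [show pvMinStep none ((fun p => (pvRank p.2 * n + p.1, p.2)) ((i, x) : Int × String))
          = some (pvRank x * n + i, x) from rfl,
        pv_foldl_some]
    have hrmin_cons : pvRmin (x :: xs) = min (pvRank x) (pvRmin xs) := by simp [pvRmin]
    by_cases hxs : xs = []
    · subst hxs
      refine ⟨i, x, le_refl i, by simp, by simp [PySem.List.enumerate], ?_, ?_⟩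
      · rcases pv_rank_cases x with h | h | h <;> simp [pvRmin, h]
      · rcases pv_rank_cases x with h | h | h <;> simp [pvRmin, h]
    · have hlen : 1 ≤ (xs.length : Int) := by
        cases xs with
        | nil => exact absurd rfl hxs
        | cons y ys => simp only [List.length_cons]; push_cast; omega
      have hn' : i + 1 + (xs.length : Int) ≤ n := by
        simp only [List.length_cons] at hn; push_cast at hn ⊢; omega
      obtain ⟨j, t, hij, hjlt, hfold, hrt, hhead⟩ := ih (i + 1) (by omega) hn' hxs
      rw [hfold]
      have hn0 : 0 < n := by omega
      have hjn : j < n := by omega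
      have hrminxs_le2 := pv_rmin_le_two xs
      by_cases hcmp : pvRank t * n + j < pvRank x * n + i
      · -- rest wins
        have hlt : pvRank t < pvRank x := by
          rcases pv_rank_cases x with hx | hx | hx <;> rcases pv_rank_cases t with ht | ht | ht <;>
            rw [hx, ht] at hcmp ⊢ <;> omega
        refine ⟨j, t, by omega, by simp only [List.length_cons]; push_cast; omega, by simp [hcmp], ?_, ?_⟩
        · rw [hrmin_cons, hrt]; rw [hrt] at hlt; omega
        · have heq : pvRmin (x :: xs) = pvRmin xs := by rw [hrmin_cons]; rw [hrt] at hlt; omega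
          have hne : (pvRank x == pvRmin (x :: xs)) = false := by
            simp only [beq_eq_false_iff_ne, ne_eq]
            rw [heq, ← hrt]; omega
          rw [List.filter_cons_of_neg (by simp [hne]), heq]
          exact hhead
      · -- head wins
        have hle : pvRank x ≤ pvRank t := by
          rcases pv_rank_cases x with hx | hx | hx <;> rcases pv_rank_cases t with ht | ht | ht <;>
            rw [hx, ht] at hcmp ⊢ <;> omega
        have heq : pvRank x = pvRmin (x :: xs) := by rw [hrmin_cons, ← hrt]; omega
        refine ⟨i, x, le_refl i, by simp only [List.length_cons]; push_cast; omega, by simp [hcmp], heq.symm ▸ rfl, ?_⟩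
        rw [List.filter_cons_of_pos (by simp [heq])]
        rfl

lemma pv_primary_eq (u : String) : pvIsPrimaryA u = (pvRank u == 0) := by
  unfold pvIsPrimaryA pvRank
  split_ifs with h1 h2 <;> simp only [PySem.Str.len_eq] at h1 <;> first
  | (simp; intros; omega)
  | (simp only [h2, Bool.true_and]; simp; omega)
  | (rcases Bool.eq_false_or_eq_true (u.toList.any PySem.Chars.isalpha) with ha | ha <;>
       rcases Bool.eq_false_or_eq_true (u.toList.any PySem.Chars.isdigit) with hd | hd <;>
         simp_all)

lemma pv_fallback_eq (u : String) : (decide ((3:Int) ≤ PySem.Str.len u)) = decide (pvRank u ≤ 1) := by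
  unfold pvRank
  split_ifs with h1 h2 <;> simp only [PySem.Str.len_eq] at h1 ⊢ <;>
    simp [-String.length_toList] <;> omega

-- ===== VERDICT (by name: the statement is the Claim_ definition above) =====
theorem derive_part_number_spec : Claim_equal_derive_part_number := by
  intro item _
  unfold Spec_derive_part_number derive_part_number derive_part_number_alt
  cases item with
  | none => rfl
  | some s =>
    dsimp only
    set ts := (PySem.Str.split₀ s).map pvStrip with hts
    by_cases hne : ts = []
    · rw [hne]; simp
    · have hlen0 : ts.length ≠ 0 := by simpa [List.length_eq_zero_iff] using hne
      rw [if_neg hlen0, pv_min?_eq_foldl]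
      obtain ⟨j, t, hj0, hjlt, hfold, hrt, hhead⟩ :=
        pv_min_char ts (ts.length) 0 le_rfl (by simp) hne
      rw [hfold]
      change _ = if pvRank t * (ts.length : Int) + j < 2 * (ts.length : Int) then some t else none
      have hn1 : (1:Int) ≤ (ts.length : Int) := by
        have : 0 < ts.length := Nat.pos_of_ne_zero hlen0
        exact_mod_cast this
      have hjn : j < (ts.length : Int) := by omega
      have hrminle : ∀ u ∈ ts, pvRmin ts ≤ pvRank u := fun u hu => pv_rmin_le ts u hu
      rcases pv_rank_cases t with h | h | h
      · -- minimum rank 0: A's primary filter is nonempty and headed by t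
        have hrmin : pvRmin ts = 0 := by rw [← hrt, h]
        have hkey : pvRank t * (ts.length : Int) + j < 2 * (ts.length : Int) := by
          rw [h]; omega
        rw [if_pos hkey]
        have hfe : ts.filter pvIsPrimaryA = ts.filter (fun u => pvRank u == pvRmin ts) := by
          apply List.filter_congr; intro u _
          rw [pv_primary_eq, hrmin]
        rw [hfe]
        have hnonempty : (ts.filter (fun u => pvRank u == pvRmin ts)).isEmpty = false := by
          cases hc : ts.filter (fun u => pvRank u == pvRmin ts) with
          | nil => rw [hc] at hhead; cases hhead
          | cons a l => simp
        rw [hnonempty]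
        simp only [Bool.false_eq_true, if_false]
        exact hhead
      · -- minimum rank 1: primary filter empty, fallback filter headed by t
        have hrmin : pvRmin ts = 1 := by rw [← hrt, h]
        have hkey : pvRank t * (ts.length : Int) + j < 2 * (ts.length : Int) := by
          rw [h]; omega
        rw [if_pos hkey]
        have hpe : ts.filter pvIsPrimaryA = [] := by
          rw [List.filter_eq_nil_iff]
          intro u hu
          rw [pv_primary_eq]
          have h1 := hrminle u hu; rw [hrmin] at h1
          simp only [beq_iff_eq]; omega
        rw [hpe]
        simp only [List.isEmpty_nil, if_true]
        have hfe : ts.filter (fun u => decide (3 ≤ PySem.Str.len u))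
            = ts.filter (fun u => pvRank u == pvRmin ts) := by
          apply List.filter_congr; intro u hu
          rw [pv_fallback_eq, hrmin]
          have h1 := hrminle u hu; rw [hrmin] at h1
          rcases pv_rank_cases u with hc | hc | hc <;> rw [hc] <;> simp <;> omega
        rw [hfe]
        exact hhead
      · -- minimum rank 2: no usable token at all
        have hrmin : pvRmin ts = 2 := by rw [← hrt, h]
        have hkey : ¬ pvRank t * (ts.length : Int) + j < 2 * (ts.length : Int) := by
          rw [h]; omega
        rw [if_neg hkey]
        have hpe : ts.filter pvIsPrimaryA = [] := by
          rw [List.filter_eq_nil_iff]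
          intro u hu
          rw [pv_primary_eq]
          have h1 := hrminle u hu; rw [hrmin] at h1
          simp only [beq_iff_eq]; omega
        have hff : ts.filter (fun u => decide (3 ≤ PySem.Str.len u)) = [] := by
          rw [List.filter_eq_nil_iff]
          intro u hu
          rw [pv_fallback_eq]
          have h1 := hrminle u hu; rw [hrmin] at h1
          simp; omega
        rw [hpe, hff]
        simp
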